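-- pv_equiv track=rewrite | github.com/HippolyteBourel/UCRL-RM | experiments_Neurips/learners/PSRL_RM.py | allmin
-- ===== SOURCE A (Python) =====
-- def allmin(a):
-- 	if len(a) == 0:
-- 		return []
-- 	all_ = [0]
-- 	min_ = a[0]
-- 	for i in range(1, len(a)):
-- 		if a[i] < min_:
-- 			all_ = [i]
-- 			min_ = a[i]
-- 		elif a[i] == min_:
-- 			all_.append(i)
-- 	return (min_, all_)
-- ===== SOURCE B (Python) =====
-- def allmin(a):
-- 	if len(a) == 0:
-- 		return []
-- 	min_ = min(a)
-- 	return (min_, [i for i, x in enumerate(a) if x == min_])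
-- ===== Notes on version B (the rewrite author's own statement) =====
-- stated objective: simpler
-- what changed: B replaces A's fused scan that maintains and resets the index list inline with two separate passes: built-in min for the value, then an enumerate comprehension collecting the argmin indices.
-- outside the precondition, e.g. on allmin([]): A returns (), B returns ()
import Mathlib
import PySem

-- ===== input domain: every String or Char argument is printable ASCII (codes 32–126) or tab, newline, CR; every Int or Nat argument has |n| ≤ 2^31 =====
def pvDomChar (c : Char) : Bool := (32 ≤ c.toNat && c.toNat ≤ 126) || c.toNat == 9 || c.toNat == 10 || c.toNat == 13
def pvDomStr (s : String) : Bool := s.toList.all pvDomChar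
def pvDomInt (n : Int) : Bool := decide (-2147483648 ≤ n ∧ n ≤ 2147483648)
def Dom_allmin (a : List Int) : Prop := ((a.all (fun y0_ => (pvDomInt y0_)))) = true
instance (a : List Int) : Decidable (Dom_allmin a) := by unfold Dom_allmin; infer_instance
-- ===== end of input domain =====

-- B replaces A's fused scan (which resets/extends the index list inline) with two
-- separate passes: built-in min for the value, then an enumerate comprehension for
-- the argmin indices. Objective: simpler.

-- ===== PORT A =====
-- the loop body of A: state is (all_, min_)
def allminStep (a : List Int) (s : List Int × Int) (i : Int) : List Int × Int :=
  let x := PySem.List.pyGetD a i 0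
  if x < s.2 then ([i], x)
  else if x = s.2 then (s.1 ++ [i], s.2)
  else s

def allmin (a : List Int) : Int × List Int :=
  let st := (PySem.List.pyRange 1 (a.length : Int) 1).foldl (allminStep a)
              ([0], PySem.List.pyGetD a 0 0)
  (st.2, st.1)

-- ===== PORT B =====
def allmin_alt (a : List Int) : Int × List Int :=
  let m := (PySem.List.min? a (fun y => y)).getD 0
  (m, ((PySem.List.enumerate a 0).filter (fun p => p.2 == m)).map (fun p => p.1))

-- ===== PRECONDITION & SPEC =====
-- Pre_ excludes the empty list: there A returns [] (not an (int, list) pair of the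
-- declared result type), and B does the same in Python; neither value is portable.
def Pre_allmin (a : List Int) : Prop := a ≠ []
instance (a : List Int) : Decidable (Pre_allmin a) := by unfold Pre_allmin; infer_instance
def pvWitness_allmin : List Int := ([3, 1, 2, 1])

def Spec_allmin (a : List Int) (out : Int × List Int) : Prop := out = allmin_alt a
instance (a : List Int) (out : Int × List Int) : Decidable (Spec_allmin a out) := by unfold Spec_allmin; infer_instance

-- ===== CLAIM (what is proved, stated in full; the proofs are below) =====
def Claim_equal_allmin : Prop := ∀ (a : List Int), Dom_allmin a → Pre_allmin a → Spec_allmin a (allmin a)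

-- ===== LEMMAS AND PROOFS =====

-- the minimum maintained by B, as the loop invariant talks about it
def bmin (ys : List Int) : Int := (PySem.List.min? ys (fun y => y)).getD 0

-- the argmin index list maintained by B
def bidx (ys : List Int) : List Int :=
  ((PySem.List.enumerate ys 0).filter (fun p => p.2 == bmin ys)).map (fun p => p.1)

theorem bmin_min?_eq (ys : List Int) (h : ys ≠ []) :
    PySem.List.min? ys (fun y => y) = some (bmin ys) := by
  obtain ⟨y, t, rfl⟩ := List.exists_cons_of_ne_nil h
  rw [bmin, PySem.List.min?_id_cons]; rfl

theorem bmin_le (ys : List Int) (h : ys ≠ []) : ∀ y ∈ ys, bmin ys ≤ y := by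
  intro y hy
  exact PySem.List.min?_isMin (bmin_min?_eq ys h) y hy

theorem bmin_append (ys : List Int) (x : Int) (h : ys ≠ []) :
    bmin (ys ++ [x]) = min (bmin ys) x := by
  obtain ⟨y, t, rfl⟩ := List.exists_cons_of_ne_nil h
  rw [bmin, List.cons_append, PySem.List.min?_id_cons]
  rw [show bmin (y :: t) = t.foldl min y by rw [bmin, PySem.List.min?_id_cons]; rfl]
  simp [List.foldl_append]

theorem pyGetD_append_lt (ys : List Int) (x : Int) (i : Int)
    (h0 : 0 ≤ i) (h : i < ys.length) :
    PySem.List.pyGetD (ys ++ [x]) i 0 = PySem.List.pyGetD ys i 0 := by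
  rw [PySem.List.pyGetD_eq_getElem (ys ++ [x]) 0 h0 (by simp; omega),
      PySem.List.pyGetD_eq_getElem ys 0 h0 h]
  rw [List.getElem_append_left]

theorem pyGetD_append_len (ys : List Int) (x : Int) :
    PySem.List.pyGetD (ys ++ [x]) (ys.length : Int) 0 = x := by
  rw [PySem.List.pyGetD_eq_getElem (ys ++ [x]) 0 (by omega) (by simp)]
  simp

theorem bidx_append (ys : List Int) (x : Int) :
    bidx (ys ++ [x]) =
      ((PySem.List.enumerate ys 0).filter (fun p => p.2 == bmin (ys ++ [x]))).map (fun p => p.1)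
        ++ (if x = bmin (ys ++ [x]) then [(ys.length : Int)] else []) := by
  rw [bidx, PySem.List.enumerate_append, List.filter_append, List.map_append]
  congr 1
  rw [PySem.List.enumerate_cons, PySem.List.enumerate_nil]
  by_cases hx : x = bmin (ys ++ [x])
  · rw [if_pos hx]
    have hb : (x == bmin (ys ++ [x])) = true := by rwa [beq_iff_eq]
    simp [hb]
  · rw [if_neg hx]
    have hb : (x == bmin (ys ++ [x])) = false := by simpa [beq_eq_false_iff_ne]
    simp [hb]

theorem allmin_inv (a : List Int) (h : a ≠ []) :
    (PySem.List.pyRange 1 (a.length : Int) 1).foldl (allminStep a)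
        ([0], PySem.List.pyGetD a 0 0)
      = (bidx a, bmin a) := by
  induction a using List.reverseRecOn with
  | nil => exact absurd rfl h
  | append_singleton ys x ih =>
    by_cases hys : ys = []
    · subst hys
      have h1 : ((([x] : List Int).length : Nat) : Int) = 1 := by simp
      rw [List.nil_append, h1, show PySem.List.pyRange 1 1 1 = [] by rfl]
      simp [bidx, bmin, PySem.List.enumerate_cons, PySem.List.enumerate_nil,
            PySem.List.min?_id_cons, PySem.List.pyGetD_zero_cons]
    · have hlen : 1 ≤ (ys.length : Int) := by
        have := List.length_pos_of_ne_nil hys; omega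
      have hcast : (((ys ++ [x]).length : Nat) : Int) = (ys.length : Int) + 1 := by
        simp
      rw [hcast, PySem.List.pyRange_one_succ_right hlen, List.foldl_append]
      -- the prefix of the fold ignores the appended element
      have hcongr : (PySem.List.pyRange 1 (ys.length : Int) 1).foldl (allminStep (ys ++ [x]))
            ([0], PySem.List.pyGetD (ys ++ [x]) 0 0)
          = (PySem.List.pyRange 1 (ys.length : Int) 1).foldl (allminStep ys)
            ([0], PySem.List.pyGetD (ys ++ [x]) 0 0) :=
        PySem.List.foldl_congr_mem _ _ _ _ (by
          intro acc i hi
          have hb := PySem.List.mem_pyRange_one.mp hi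
          unfold allminStep
          rw [pyGetD_append_lt ys x i (by omega) (by omega)])
      rw [hcongr,
          pyGetD_append_lt ys x 0 (by omega)
            (by exact_mod_cast List.length_pos_of_ne_nil hys),
          ih hys]
      -- the last step of the fold
      simp only [List.foldl_cons, List.foldl_nil, allminStep, pyGetD_append_len]
      rw [bidx_append ys x, bmin_append ys x hys]
      by_cases hlt : x < bmin ys
      · -- new strict minimum: no earlier element equals it
        have hmx : min (bmin ys) x = x := by omega
        have hfilt : (PySem.List.enumerate ys 0).filter (fun p => p.2 == min (bmin ys) x) = [] := by
          rw [List.filter_eq_nil_iff]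
          intro p hp
          rw [PySem.List.mem_enumerate_iff] at hp
          obtain ⟨k, hk, rfl⟩ := hp
          have := bmin_le ys hys (ys[k]) (by simp)
          simp only [beq_iff_eq]
          omega
        rw [if_pos hlt, hfilt, hmx, if_pos rfl]
        simp
      · by_cases heq : x = bmin ys
        · have hmx : min (bmin ys) x = bmin ys := by omega
          rw [if_neg hlt, if_pos heq, hmx, if_pos heq, bidx]
        · have hmx : min (bmin ys) x = bmin ys := by omega
          rw [if_neg hlt, if_neg heq, hmx, if_neg heq, bidx]
          simp

-- ===== VERDICT (by name: the statement is the Claim_ definition above) =====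
theorem allmin_spec : Claim_equal_allmin := by
  intro a _ hpre
  unfold Spec_allmin allmin allmin_alt
  rw [allmin_inv a hpre]
  rfl
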